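-- pv_equiv track=rewrite | github.com/learningmatter-mit/NeuralForceField | nff/nn/models/orb_net.py | get_starts
-- ===== SOURCE A (Python) =====
-- def get_starts(shells):
--     starts = [0]
--     old_idx = None
--     n_orb = 0
--     for shell in shells:
--         idx = shell["center_index"]
--         if old_idx != idx:
--             starts.append(starts[-1])
--         l = shell["angular_momentum"]
--         num = 2 * l + 1
--         n_orb += num
--         starts[-1] += num
--         old_idx = idx
--
--     n_at = len(starts) - 1
--     return starts, n_orb, n_at
-- ===== SOURCE B (Python) =====
-- def get_starts(shells):
--     # pass 1: consecutive grouping by center_index -> orbitals per atom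
--     per_atom = []
--     i, n = 0, len(shells)
--     while i < n:
--         key = shells[i]["center_index"]
--         tot = 0
--         while i < n and shells[i]["center_index"] == key:
--             tot += 2 * shells[i]["angular_momentum"] + 1
--             i += 1
--         per_atom.append(tot)
--     # pass 2: prefix sums over the per-atom counts
--     starts = [0]
--     for t in per_atom:
--         starts.append(starts[-1] + t)
--     return starts, sum(per_atom), len(per_atom)
-- ===== Notes on version B (the rewrite author's own statement) =====
-- stated objective: alternative
-- what changed: A's single fused loop that mutates starts[-1] while tracking old_idx is replaced by a two-pass group-then-prefix-sum: first collapse consecutive shells with equal center_index into per-atom orbital counts, then take prefix sums of those counts.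
import Mathlib
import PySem

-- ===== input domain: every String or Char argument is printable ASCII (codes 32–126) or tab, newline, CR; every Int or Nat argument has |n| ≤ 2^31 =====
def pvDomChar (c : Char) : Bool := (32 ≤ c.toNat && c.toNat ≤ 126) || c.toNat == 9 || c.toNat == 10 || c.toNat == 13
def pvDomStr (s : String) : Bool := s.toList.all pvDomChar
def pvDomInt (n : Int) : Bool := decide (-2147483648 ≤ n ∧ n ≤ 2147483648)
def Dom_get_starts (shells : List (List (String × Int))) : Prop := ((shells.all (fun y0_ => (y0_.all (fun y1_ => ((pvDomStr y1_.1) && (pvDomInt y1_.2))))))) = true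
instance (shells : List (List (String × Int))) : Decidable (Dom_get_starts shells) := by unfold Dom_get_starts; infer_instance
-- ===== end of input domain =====

-- B replaces A's fused accumulating loop (old_idx tracking + in-place starts[-1] updates) by a
-- two-pass group-then-prefix-sum structure; objective: alternative (same cost, different shape).

-- ===== PORT A =====
-- shell["k"]: first-match lookup; exact when the key is present (guaranteed by Pre_),
-- Python raises KeyError otherwise (excluded by Pre_).
def pvKey (shell : List (String × Int)) (k : String) : Int :=
  (PySem.Dict.mk shell).getD k 0

-- the for-loop of A; state = (starts, old_idx, n_orb); old_idx is threaded, not returned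
def getStartsLoop : List (List (String × Int)) → List Int → Option Int → Int → List Int × Int
  | [], starts, _, n_orb => (starts, n_orb)
  | shell :: rest, starts, old_idx, n_orb =>
      let idx := pvKey shell "center_index"
      let starts := if old_idx ≠ some idx then starts ++ [starts.getLastD 0] else starts
      let num := 2 * pvKey shell "angular_momentum" + 1
      let starts := starts.dropLast ++ [starts.getLastD 0 + num]   -- starts[-1] += num
      getStartsLoop rest starts (some idx) (n_orb + num)

def get_starts (shells : List (List (String × Int))) : List Int × Int × Int :=
  let (starts, n_orb) := getStartsLoop shells [0] none 0
  (starts, n_orb, (starts.length : Int) - 1)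

-- ===== PORT B =====
-- inner while-loop of B: consume the leading run with center_index = key,
-- returning (orbital count of the run, remaining shells)
def takeGroup (key : Int) : List (List (String × Int)) → Int × List (List (String × Int))
  | [] => (0, [])
  | s :: rest =>
      if pvKey s "center_index" = key then
        ((2 * pvKey s "angular_momentum" + 1) + (takeGroup key rest).1, (takeGroup key rest).2)
      else (0, s :: rest)

theorem takeGroup_snd_length_le (key : Int) :
    ∀ l : List (List (String × Int)), (takeGroup key l).2.length ≤ l.length
  | [] => Nat.le_refl _
  | s :: rest => by
      simp only [takeGroup]
      split
      · exact Nat.le_succ_of_le (takeGroup_snd_length_le key rest)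
      · exact Nat.le_refl _


-- outer while-loop of B (pass 1): per-atom orbital counts of consecutive groups
def perAtom : List (List (String × Int)) → List Int
  | [] => []
  | s :: rest =>
      ((2 * pvKey s "angular_momentum" + 1) + (takeGroup (pvKey s "center_index") rest).1)
        :: perAtom (takeGroup (pvKey s "center_index") rest).2
termination_by l => l.length
decreasing_by
  exact Nat.lt_succ_of_le (takeGroup_snd_length_le _ _)

def get_starts_alt (shells : List (List (String × Int))) : List Int × Int × Int :=
  let groups := perAtom shells
  -- pass 2: starts.append(starts[-1] + t)
  let starts := groups.foldl (fun acc t => acc ++ [acc.getLastD 0 + t]) [0]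
  (starts, groups.sum, (groups.length : Int))

-- ===== PRECONDITION & SPEC =====
-- Pre_ excludes exactly the shells missing the key "center_index" or "angular_momentum",
-- on which both Pythons raise KeyError.
def Pre_get_starts (shells : List (List (String × Int))) : Prop :=
  (shells.all (fun s => (PySem.Dict.mk s).contains "center_index"
                        && (PySem.Dict.mk s).contains "angular_momentum")) = true
instance (shells : List (List (String × Int))) : Decidable (Pre_get_starts shells) := by
  unfold Pre_get_starts; infer_instance

def pvWitness_get_starts : (List (List (String × Int))) :=
  [[("center_index", 0), ("angular_momentum", 1)], [("center_index", 1), ("angular_momentum", 0)]]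

def Spec_get_starts (shells : List (List (String × Int))) (out : List Int × Int × Int) : Prop := out = get_starts_alt shells
instance (shells : List (List (String × Int))) (out : List Int × Int × Int) : Decidable (Spec_get_starts shells out) := by unfold Spec_get_starts; infer_instance

-- ===== CLAIM (what is proved, stated in full; the proofs are below) =====
def Claim_equal_get_starts : Prop := ∀ (shells : List (List (String × Int))), Dom_get_starts shells → Pre_get_starts shells → Spec_get_starts shells (get_starts shells)

-- ===== LEMMAS AND PROOFS =====

-- prefix sums of a list of counts, starting strictly after `base`
def prefixFrom (base : Int) : List Int → List Int
  | [] => []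
  | g :: gs => (base + g) :: prefixFrom (base + g) gs

theorem getLastD_concat (l : List Int) (x d : Int) : (l ++ [x]).getLastD d = x := by
  induction l with
  | nil => rfl
  | cons a l ih => cases l <;> simp_all

theorem length_prefixFrom (base : Int) (gs : List Int) :
    (prefixFrom base gs).length = gs.length := by
  induction gs generalizing base with
  | nil => rfl
  | cons g gs ih => simp [prefixFrom, ih]

theorem foldl_eq_prefixFrom (gs : List Int) :
    ∀ starts : List Int,
      gs.foldl (fun acc t => acc ++ [acc.getLastD 0 + t]) starts
        = starts ++ prefixFrom (starts.getLastD 0) gs := by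
  induction gs with
  | nil => intro starts; simp [prefixFrom]
  | cons g gs ih =>
      intro starts
      simp only [List.foldl, prefixFrom]
      rw [ih (starts ++ [starts.getLastD 0 + g]), getLastD_concat]
      simp

-- A's loop swallows a whole leading run with key = old_idx in one bump of starts[-1]
theorem loop_takeGroup (k : Int) :
    ∀ (l : List (List (String × Int))) (starts : List Int) (last n : Int),
      getStartsLoop l (starts ++ [last]) (some k) n
        = getStartsLoop (takeGroup k l).2 (starts ++ [last + (takeGroup k l).1]) (some k)
            (n + (takeGroup k l).1) := by
  intro l
  induction l with
  | nil => intro starts last n; simp [takeGroup]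
  | cons s rest ih =>
      intro starts last n
      by_cases hk : pvKey s "center_index" = k
      · subst hk
        simp only [getStartsLoop, takeGroup, ne_eq, not_true_eq_false, if_false,
          getLastD_concat, List.dropLast_concat]
        rw [ih starts (last + (2 * pvKey s "angular_momentum" + 1)) (n + (2 * pvKey s "angular_momentum" + 1))]
        have h1 : last + (2 * pvKey s "angular_momentum" + 1) + (takeGroup (pvKey s "center_index") rest).1
            = last + (2 * pvKey s "angular_momentum" + 1 + (takeGroup (pvKey s "center_index") rest).1) := by ring
        have h2 : n + (2 * pvKey s "angular_momentum" + 1) + (takeGroup (pvKey s "center_index") rest).1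
            = n + (2 * pvKey s "angular_momentum" + 1 + (takeGroup (pvKey s "center_index") rest).1) := by ring
        rw [h1, h2]
        simp
      · simp [takeGroup, hk]

-- what remains after a run never starts with the run's key
theorem takeGroup_snd_head (k : Int) :
    ∀ (l : List (List (String × Int))) (s' : List (String × Int)) (r : List (List (String × Int))),
      (takeGroup k l).2 = s' :: r → pvKey s' "center_index" ≠ k := by
  intro l
  induction l with
  | nil => intro s' r h; simp [takeGroup] at h
  | cons s rest ih =>
      intro s' r h
      by_cases hk : pvKey s "center_index" = k
      · simp only [takeGroup, if_pos hk] at h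
        exact ih s' r h
      · simp only [takeGroup, if_neg hk] at h
        cases h
        exact hk

-- A's whole loop, characterised by the per-atom counts and prefix sums
theorem loop_eq_prefix :
    ∀ (N : Nat) (l : List (List (String × Int))), l.length ≤ N →
    ∀ (starts : List Int) (old : Option Int) (n : Int),
      (∀ s rest, l = s :: rest → old ≠ some (pvKey s "center_index")) →
      getStartsLoop l starts old n
        = (starts ++ prefixFrom (starts.getLastD 0) (perAtom l), n + (perAtom l).sum) := by
  intro N
  induction N with
  | zero =>
      intro l hl starts old n _
      have : l = [] := List.length_eq_zero_iff.mp (Nat.le_zero.mp hl)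
      subst this
      simp [getStartsLoop, perAtom, prefixFrom]
  | succ N ih =>
      intro l hl starts old n hold
      cases l with
      | nil => simp [getStartsLoop, perAtom, prefixFrom]
      | cons s rest =>
          have hkey := hold s rest rfl
          simp only [getStartsLoop, if_pos hkey, getLastD_concat, List.dropLast_concat]
          rw [loop_takeGroup]
          have hlen : (takeGroup (pvKey s "center_index") rest).2.length ≤ N := by
            have := takeGroup_snd_length_le (pvKey s "center_index") rest
            simpa using Nat.le_trans this (Nat.le_of_succ_le_succ hl)
          rw [ih _ hlen _ _ _ (by
            intro s' r' hr
            have := takeGroup_snd_head (pvKey s "center_index") rest s' r' hr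
            simp only [ne_eq, Option.some.injEq]
            exact fun h => this h.symm)]
          rw [getLastD_concat]
          have hg : perAtom (s :: rest)
              = ((2 * pvKey s "angular_momentum" + 1) + (takeGroup (pvKey s "center_index") rest).1)
                :: perAtom (takeGroup (pvKey s "center_index") rest).2 := by
            rw [perAtom]
          rw [hg]
          simp only [prefixFrom, List.sum_cons]
          have e1 : starts.getLastD 0 + (2 * pvKey s "angular_momentum" + 1) + (takeGroup (pvKey s "center_index") rest).1
              = starts.getLastD 0 + (2 * pvKey s "angular_momentum" + 1 + (takeGroup (pvKey s "center_index") rest).1) := by ring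
          have e2 : n + (2 * pvKey s "angular_momentum" + 1) + (takeGroup (pvKey s "center_index") rest).1
                + (perAtom (takeGroup (pvKey s "center_index") rest).2).sum
              = n + (2 * pvKey s "angular_momentum" + 1 + (takeGroup (pvKey s "center_index") rest).1
                + (perAtom (takeGroup (pvKey s "center_index") rest).2).sum) := by ring
          rw [e1, e2]
          simp [List.append_assoc]

-- ===== VERDICT (by name: the statement is the Claim_ definition above) =====
theorem get_starts_spec : Claim_equal_get_starts := by
  intro shells _ _
  unfold Spec_get_starts get_starts get_starts_alt
  rw [loop_eq_prefix shells.length shells (Nat.le_refl _) [0] none 0 (by intro s rest h hc; cases hc)]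
  simp only [foldl_eq_prefixFrom]
  simp [length_prefixFrom]
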